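-- pv_equiv track=rewrite | github.com/ehrl1225/Coding_Test | 더_맵게.py | solution
-- ===== SOURCE A (Python) =====
-- def solution(scoville, K):
--     count = 0
--     scoville = sorted(scoville)
--     while True:
--         if len(scoville)==1:
--             return -1
--         scoville[0] = (scoville[0]+(scoville[1]*2))
--         del scoville[1]
--         scoville= sorted(scoville)
--         count +=1
--         if scoville[0]>=K:
--             return count
-- ===== SOURCE B (Python) =====
-- def solution(scoville, K):
--     # Two-queue Huffman-style technique: after one sort, the two current smallest
--     # values are always at the fronts of (a) the sorted original values and
--     # (b) the FIFO queue of merged values, so each merge is O(1) -- no re-sort,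
--     # no heap, no insertion scan.  (The merged queue stays sorted: this is the
--     # classic two-queue argument, proved in the Lean file for all integers.)
--     base = sorted(scoville)
--     merged = []
--     i = 0  # front of base
--     j = 0  # front of merged
--     count = 0
--     while True:
--         if (len(base) - i) + (len(merged) - j) == 1:
--             return -1
--         if j >= len(merged) or (i < len(base) and base[i] <= merged[j]):
--             x = base[i]; i += 1
--         else:
--             x = merged[j]; j += 1
--         if j >= len(merged) or (i < len(base) and base[i] <= merged[j]):
--             y = base[i]; i += 1
--         else:
--             y = merged[j]; j += 1
--         merged.append(x + 2 * y)
--         count += 1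
--         if j >= len(merged) or (i < len(base) and base[i] <= merged[j]):
--             m = base[i]
--         else:
--             m = merged[j]
--         if m >= K:
--             return count
-- ===== Notes on version B (the rewrite author's own statement) =====
-- stated objective: faster
-- what changed: B replaces A's re-sort of the whole list after every merge with the two-queue technique: sort once, then keep a FIFO queue of merged values whose front together with the front of the sorted input always holds the two smallest elements, so each merge is O(1).
import Mathlib
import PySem

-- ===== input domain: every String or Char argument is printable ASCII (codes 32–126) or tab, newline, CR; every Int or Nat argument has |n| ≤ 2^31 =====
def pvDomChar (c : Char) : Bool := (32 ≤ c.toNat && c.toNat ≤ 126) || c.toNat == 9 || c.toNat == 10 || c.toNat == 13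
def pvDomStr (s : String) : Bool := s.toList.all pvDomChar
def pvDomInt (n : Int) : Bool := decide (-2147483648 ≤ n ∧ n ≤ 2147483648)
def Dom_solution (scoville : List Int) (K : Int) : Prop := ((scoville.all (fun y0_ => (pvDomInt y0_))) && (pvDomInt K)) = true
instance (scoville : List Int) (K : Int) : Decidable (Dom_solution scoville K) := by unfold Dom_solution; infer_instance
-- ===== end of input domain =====

-- B replaces A's per-merge re-sort with the two-queue technique (sort once, FIFO queue of
-- merged values, each merge O(1)); same return value on every nonempty input (A raises
-- IndexError on []).

-- ===== PORT A =====
-- loop body of A: scoville[0] = scoville[0]+scoville[1]*2; del scoville[1]; re-sort; count += 1;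
-- fuel is the list length (each pass shortens the list by one, so it never runs out on the
-- admitted inputs; the fuel-0 / too-short branches correspond to Python's IndexError on []).
def solutionGoA : Nat → List Int → Int → Int → Int
  | 0, _, _, _ => 0
  | fuel+1, s, K, count =>
    if s.length = 1 then -1
    else
      match s with
      | a :: b :: t =>
          let s2 := PySem.List.sorted ((a + b * 2) :: t) (fun x => x) false
          if s2.headD 0 ≥ K then count + 1 else solutionGoA fuel s2 K (count + 1)
      | _ => 0

def solution (scoville : List Int) (K : Int) : Int :=
  solutionGoA scoville.length (PySem.List.sorted scoville (fun x => x) false) K 0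

-- ===== PORT B =====
-- Source B's front pop: advancing a pointer past the front of a queue is dropping its head.
-- Returns none exactly where Source B's pop raises IndexError (both queues exhausted).
def popMin : List Int → List Int → Option (Int × List Int × List Int)
  | [], [] => none
  | b :: bs, [] => some (b, bs, [])
  | [], m :: ms => some (m, [], ms)
  | b :: bs, m :: ms => if b ≤ m then some (b, bs, m :: ms) else some (m, b :: bs, ms)

-- Source B's final front comparison (both queues never empty when it runs; 0 is unreachable).
def peekMin : List Int → List Int → Int
  | [], [] => 0
  | b :: _, [] => b
  | [], m :: _ => m
  | b :: _, m :: _ => if b ≤ m then b else m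

-- Source B's while loop; fuel = initial length (each pass removes one element).
def solutionGoB : Nat → List Int → List Int → Int → Int → Int
  | 0, _, _, _, _ => 0
  | fuel+1, base, q, K, count =>
    if base.length + q.length = 1 then -1
    else
      match popMin base q with
      | none => 0
      | some (x, b1, q1) =>
        match popMin b1 q1 with
        | none => 0
        | some (y, b2, q2) =>
          let q3 := q2 ++ [x + 2 * y]
          if peekMin b2 q3 ≥ K then count + 1 else solutionGoB fuel b2 q3 K (count + 1)

def solution_alt (scoville : List Int) (K : Int) : Int :=
  let base := PySem.List.sorted scoville (fun x => x) false
  solutionGoB base.length base [] K 0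

-- ===== PRECONDITION & SPEC =====
-- Pre_ excludes only the empty list, on which A raises IndexError (B does too).
def Pre_solution (scoville : List Int) (K : Int) : Prop := scoville ≠ []
instance (scoville : List Int) (K : Int) : Decidable (Pre_solution scoville K) := by
  unfold Pre_solution; infer_instance
def pvWitness_solution : List Int × Int := ([1, 2, 3, 9, 10, 12], 7)

def Spec_solution (scoville : List Int) (K : Int) (out : Int) : Prop := out = solution_alt scoville K
instance (scoville : List Int) (K : Int) (out : Int) : Decidable (Spec_solution scoville K out) := by unfold Spec_solution; infer_instance

-- ===== CLAIM (what is proved, stated in full; the proofs are below) =====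
def Claim_equal_solution : Prop := ∀ (scoville : List Int) (K : Int), Dom_solution scoville K → Pre_solution scoville K → Spec_solution scoville K (solution scoville K)

-- ===== LEMMAS AND PROOFS =====

-- canonical sorted form used for statements
def sortI (l : List Int) : List Int := PySem.List.sorted l (fun x => x) false

-- the two-queue invariant: every merged-queue element w is at most x + 2*y, where
-- x ≤ y are the two smallest remaining elements besides w
def INV (base q : List Int) : Prop :=
  ∀ w ∈ q, match sortI ((base ++ q).erase w) with
    | x :: y :: _ => w ≤ x + 2 * y
    | _ => True

theorem sortI_perm (l : List Int) : (sortI l).Perm l := by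
  simpa [sortI] using PySem.List.sorted_perm l (fun x => x) false

theorem sortI_pairwise (l : List Int) : (sortI l).Pairwise (· ≤ ·) := by
  simpa [sortI] using PySem.List.sorted_pairwise l (fun x => x)

theorem sortI_of_perm_pairwise {l l' : List Int} (hp : l'.Perm l)
    (hs : l'.Pairwise (· ≤ ·)) : sortI l = l' :=
  PySem.List.sorted_id_eq_of_perm_of_pairwise l l' hp hs

-- erasing an element of the suffix commutes (up to permutation) with a prefix
theorem erase_append_perm (pre u : List Int) (w : Int) (hw : w ∈ u) :
    ((pre ++ u).erase w).Perm (pre ++ u.erase w) := by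
  have h1 : (pre ++ u).Perm (w :: ((pre ++ u).erase w)) :=
    List.perm_cons_erase (by simp [hw])
  have h2 : (pre ++ u).Perm (w :: (pre ++ u.erase w)) :=
    (List.Perm.append_left pre (List.perm_cons_erase hw)).trans List.perm_middle
  exact (h1.symm.trans h2).cons_inv

-- popMin on sorted queues returns the minimum; remaining queues are tails/unchanged
theorem popMin_spec (b q : List Int) (hb : b.Pairwise (· ≤ ·)) (hq : q.Pairwise (· ≤ ·))
    (hne : b ++ q ≠ []) :
    ∃ x b' q', popMin b q = some (x, b', q') ∧
      (b ++ q).Perm (x :: (b' ++ q')) ∧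
      (∀ z ∈ b' ++ q', x ≤ z) ∧
      b'.Pairwise (· ≤ ·) ∧ q'.Pairwise (· ≤ ·) ∧ q'.Sublist q := by
  match b, q with
  | [], [] => simp at hne
  | x :: bs, [] =>
    refine ⟨x, bs, [], rfl, by simp, ?_, (List.pairwise_cons.mp hb).2, List.Pairwise.nil, by simp⟩
    intro z hz; exact (List.pairwise_cons.mp hb).1 z (by simpa using hz)
  | [], m :: ms =>
    refine ⟨m, [], ms, rfl, by simp, ?_, List.Pairwise.nil, (List.pairwise_cons.mp hq).2, by simp⟩
    intro z hz; exact (List.pairwise_cons.mp hq).1 z (by simpa using hz)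
  | x :: bs, m :: ms =>
    rcases List.pairwise_cons.mp hb with ⟨hxle, hbs⟩
    rcases List.pairwise_cons.mp hq with ⟨hmle, hms⟩
    by_cases hxm : x ≤ m
    · refine ⟨x, bs, m :: ms, by simp [popMin, hxm], by simp, ?_, hbs, hq, List.Sublist.refl _⟩
      intro z hz
      rcases List.mem_append.mp hz with h | h
      · exact hxle z h
      · rcases List.mem_cons.mp h with h | h
        · exact h ▸ hxm
        · exact le_trans hxm (hmle z h)
    · refine ⟨m, x :: bs, ms, by simp [popMin, hxm], List.perm_middle, ?_, hb, hms,
        List.sublist_cons_self m ms⟩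
      intro z hz
      rcases List.mem_append.mp hz with h | h
      · rcases List.mem_cons.mp h with h | h
        · exact h ▸ le_of_not_ge hxm
        · exact le_trans (le_of_not_ge hxm) (hxle z h)
      · exact hmle z h

-- similarly, peekMin is the minimum value
theorem peekMin_spec (b q : List Int) (hb : b.Pairwise (· ≤ ·)) (hq : q.Pairwise (· ≤ ·))
    (hne : b ++ q ≠ []) :
    peekMin b q ∈ b ++ q ∧ ∀ z ∈ b ++ q, peekMin b q ≤ z := by
  match b, q with
  | [], [] => simp at hne
  | x :: bs, [] =>
    rcases List.pairwise_cons.mp hb with ⟨hxle, _⟩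
    refine ⟨by simp [peekMin], ?_⟩
    intro z hz
    rcases List.mem_cons.mp (by simpa using hz) with h | h
    · exact h ▸ le_refl _
    · exact hxle z h
  | [], m :: ms =>
    rcases List.pairwise_cons.mp hq with ⟨hmle, _⟩
    refine ⟨by simp [peekMin], ?_⟩
    intro z hz
    rcases List.mem_cons.mp (by simpa using hz) with h | h
    · exact h ▸ le_refl _
    · exact hmle z h
  | x :: bs, m :: ms =>
    rcases List.pairwise_cons.mp hb with ⟨hxle, _⟩
    rcases List.pairwise_cons.mp hq with ⟨hmle, _⟩
    constructor
    · by_cases hxm : x ≤ m <;> simp [peekMin, hxm]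
    · intro z hz
      rcases List.mem_append.mp hz with h | h
      · rcases List.mem_cons.mp h with rfl | h
        · by_cases hxm : z ≤ m <;> simp [peekMin, hxm, le_of_not_ge]
        · have hz' := hxle z h
          by_cases hxm : x ≤ m <;> simp [peekMin, hxm] <;> omega
      · rcases List.mem_cons.mp h with rfl | h
        · by_cases hxm : x ≤ z <;> simp [peekMin, hxm, le_of_not_ge]
        · have hz' := hmle z h
          by_cases hxm : x ≤ m <;> simp [peekMin, hxm] <;> omega

-- minimum value of a multiset is determined
theorem min_unique {m : List Int} {a x : Int} {t r : List Int}
    (h1 : m.Perm (a :: t)) (ha : ∀ z ∈ t, a ≤ z)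
    (h2 : m.Perm (x :: r)) (hx : ∀ z ∈ r, x ≤ z) : a = x := by
  have hax : a ∈ x :: r := (h2.symm.trans h1).symm.mem_iff.mp (by simp)
  have hxa : x ∈ a :: t := (h1.symm.trans h2).symm.mem_iff.mp (by simp)
  rcases List.mem_cons.mp hax with h | h
  · exact h
  · rcases List.mem_cons.mp hxa with h' | h'
    · exact h'.symm
    · exact le_antisymm (ha x h') (hx a h)

-- the main loop correspondence: A's fully-sorted list vs B's two sorted queues
theorem go_eq (K : Int) (fuel : Nat) (base q s : List Int) (count : Int)
    (hb : base.Pairwise (· ≤ ·)) (hq : q.Pairwise (· ≤ ·)) (hinv : INV base q)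
    (hsp : s.Perm (base ++ q)) (hss : s.Pairwise (· ≤ ·))
    (hne : 1 ≤ base.length + q.length) (hfuel : base.length + q.length ≤ fuel) :
    solutionGoA fuel s K count = solutionGoB fuel base q K count := by
  induction fuel generalizing base q s count with
  | zero => omega
  | succ fuel ih =>
    have hlen_s : s.length = base.length + q.length := by
      simpa using hsp.length_eq
    by_cases hone : base.length + q.length = 1
    · -- one element left on both sides: -1
      simp [solutionGoA, solutionGoB, hone, hlen_s]
    · have h2 : 2 ≤ base.length + q.length := by omega
      -- pop the two minima on B's side
      obtain ⟨x, b1, q1, hpop1, hperm1, hxle, hb1, hq1, hq1sub⟩ :=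
        popMin_spec base q hb hq (by
          intro h
          have hl : base.length + q.length = 0 := by
            rw [← List.length_append, h]; rfl
          omega)
      have hlen1 : (b1 ++ q1).length + 1 = base.length + q.length := by
        simpa using hperm1.length_eq.symm
      obtain ⟨y, b2, q2, hpop2, hperm2, hyle, hb2, hq2, hq2sub⟩ :=
        popMin_spec b1 q1 hb1 hq1 (by
          intro h
          rw [h] at hlen1
          simp at hlen1
          omega)
      have hlen2 : (b2 ++ q2).length + 2 = base.length + q.length := by
        have h1 := hperm2.length_eq
        have h0 := hlen1
        simp at h1 h0 ⊢
        omega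
      -- the full multiset is x :: y :: (b2 ++ q2)
      have hperm12 : (base ++ q).Perm (x :: y :: (b2 ++ q2)) :=
        hperm1.trans (hperm2.cons x)
      have hxy : x ≤ y := hxle y (hperm2.mem_iff.mpr (by simp))
      -- decompose A's sorted list
      obtain ⟨a, bb, t, rfl⟩ : ∃ a bb t, s = a :: bb :: t := by
        rcases s with _ | ⟨a, _ | ⟨bb, t⟩⟩
        · simp at hlen_s; omega
        · simp at hlen_s; omega
        · exact ⟨a, bb, t, rfl⟩
      · rcases List.pairwise_cons.mp hss with ⟨hale, hss'⟩
        rcases List.pairwise_cons.mp hss' with ⟨hble, ht⟩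
        -- a = x
        have hax : a = x :=
          min_unique (m := base ++ q) hsp.symm (fun z hz => hale z hz)
            hperm1 (fun z hz => hxle z hz)
        have hperm_t1 : (bb :: t).Perm (b1 ++ q1) := by
          have := hsp.trans hperm1
          rw [← hax] at this
          exact this.cons_inv
        -- bb = y
        have hby : bb = y :=
          min_unique (m := b1 ++ q1) hperm_t1.symm (fun z hz => hble z hz)
            hperm2 (fun z hz => hyle z hz)
        have hperm_t2 : t.Perm (b2 ++ q2) := by
          have := hperm_t1.trans hperm2
          rw [← hby] at this
          exact this.cons_inv
        -- every surviving merged-queue element is ≤ x + 2*y (from the invariant)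
        have hq2bound : ∀ w ∈ q2, w ≤ x + 2 * y := by
          intro w hw
          have hwq : w ∈ q := hq1sub.mem (hq2sub.mem hw)
          have hw22 : w ∈ b2 ++ q2 := List.mem_append_right _ hw
          have hkey := hinv w hwq
          have hperm_er : ((base ++ q).erase w).Perm (x :: y :: ((b2 ++ q2).erase w)) :=
            (hperm12.erase w).trans (erase_append_perm [x, y] (b2 ++ q2) w hw22)
          have hsort_er : sortI ((base ++ q).erase w)
              = x :: y :: sortI ((b2 ++ q2).erase w) := by
            apply sortI_of_perm_pairwise
            · exact ((((sortI_perm ((b2 ++ q2).erase w)).cons y).cons x)).trans hperm_er.symm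
            · refine List.pairwise_cons.mpr ⟨?_, List.pairwise_cons.mpr ⟨?_, sortI_pairwise _⟩⟩
              · intro z hz
                rcases List.mem_cons.mp hz with h | h
                · exact h ▸ hxy
                · exact hxle z (hperm2.mem_iff.mpr
                    (List.mem_cons_of_mem y (List.erase_sublist.mem
                      ((sortI_perm _).mem_iff.mp h))))
              · intro z hz
                exact hyle z (List.erase_sublist.mem ((sortI_perm _).mem_iff.mp hz))
          rw [hsort_er] at hkey
          exact hkey
        -- the new state
        set v : Int := x + 2 * y with hv
        have hq3 : (q2 ++ [v]).Pairwise (· ≤ ·) := by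
          refine List.pairwise_append.mpr ⟨hq2, List.pairwise_singleton _ _, ?_⟩
          intro w hw z hz
          rcases List.mem_singleton.mp hz with rfl
          exact hq2bound w hw
        have hperm_new : (b2 ++ (q2 ++ [v])).Perm (v :: (b2 ++ q2)) := by
          rw [← List.append_assoc]
          exact List.perm_append_singleton v (b2 ++ q2)
        have hs2perm : (sortI ((a + bb * 2) :: t)).Perm (b2 ++ (q2 ++ [v])) := by
          have h1 : ((a + bb * 2) :: t).Perm (v :: (b2 ++ q2)) := by
            have : a + bb * 2 = v := by rw [hax, hby, hv]; ring
            rw [this]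
            exact hperm_t2.cons v
          exact ((sortI_perm _).trans h1).trans hperm_new.symm
        -- the new invariant
        have hinv' : INV b2 (q2 ++ [v]) := by
          intro w hw
          have hsurv : ∀ z ∈ b2 ++ q2, y ≤ z := hyle
          rcases List.mem_append.mp hw with hwq2 | hwv
          · -- an old element: y ≤ w ≤ v
            have hwub : w ≤ v := hq2bound w hwq2
            have hwlb : y ≤ w := hsurv w (List.mem_append_right _ hwq2)
            have hperm_er : ((b2 ++ (q2 ++ [v])).erase w).Perm
                (v :: ((b2 ++ q2).erase w)) := by
              have hw22 : w ∈ b2 ++ q2 := List.mem_append_right _ hwq2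
              exact (hperm_new.erase w).trans (erase_append_perm [v] (b2 ++ q2) w hw22)
            rcases hc : sortI ((b2 ++ (q2 ++ [v])).erase w) with _ | ⟨x2, _ | ⟨y2, r⟩⟩
            · simp
            · simp
            · have hmem : ∀ z ∈ (x2 :: y2 :: r), z = v ∨ y ≤ z := by
                intro z hz
                have : z ∈ v :: ((b2 ++ q2).erase w) := by
                  have := (sortI_perm ((b2 ++ (q2 ++ [v])).erase w)).mem_iff.mp
                    (hc ▸ hz)
                  exact hperm_er.mem_iff.mp this
                rcases List.mem_cons.mp this with h | h
                · exact Or.inl h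
                · exact Or.inr (hsurv z (List.erase_sublist.mem h))
              have hx2 := hmem x2 (by simp)
              have hy2 := hmem y2 (by simp)
              show w ≤ x2 + 2 * y2
              rcases hx2 with h | h <;> rcases hy2 with h' | h' <;>
                (first | (subst h; subst h'; omega) | (try subst h) <;> (try subst h') <;> omega)
          · -- the freshly appended element v
            rcases List.mem_singleton.mp hwv with rfl
            have hperm_er : ((b2 ++ (q2 ++ [v])).erase v).Perm (b2 ++ q2) := by
              simpa using hperm_new.erase v
            rcases hc : sortI ((b2 ++ (q2 ++ [v])).erase v) with _ | ⟨x2, _ | ⟨y2, r⟩⟩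
            · simp
            · simp
            · have hmem : ∀ z ∈ (x2 :: y2 :: r), y ≤ z := by
                intro z hz
                have : z ∈ b2 ++ q2 := hperm_er.mem_iff.mp
                  ((sortI_perm _).mem_iff.mp (hc ▸ hz))
                exact hyle z this
              have hx2 := hmem x2 (by simp)
              have hy2 := hmem y2 (by simp)
              show v ≤ x2 + 2 * y2
              omega
        -- the head of A's re-sorted list equals B's peeked minimum
        have hq3ne : b2 ++ (q2 ++ [v]) ≠ [] := by simp
        obtain ⟨hpmem, hple⟩ := peekMin_spec b2 (q2 ++ [v]) hb2 hq3 hq3ne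
        have hhead : (sortI ((a + bb * 2) :: t)).headD 0 = peekMin b2 (q2 ++ [v]) := by
          rcases hs : sortI ((a + bb * 2) :: t) with _ | ⟨h, tl⟩
          · exfalso
            have hl := (hs ▸ hs2perm).length_eq
            simp at hl
          · have hsp2 : (h :: tl).Perm (b2 ++ (q2 ++ [v])) := hs ▸ hs2perm
            have hpw := hs ▸ sortI_pairwise ((a + bb * 2) :: t)
            rcases List.pairwise_cons.mp hpw with ⟨hhle, _⟩
            have : h = peekMin b2 (q2 ++ [v]) :=
              min_unique (m := b2 ++ (q2 ++ [v])) hsp2.symm (fun z hz => hhle z hz)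
                (List.perm_cons_erase hpmem)
                (fun z hz => hple z (List.erase_sublist.mem hz))
            simpa using this
        -- unfold one step of both loops
        have stepA : solutionGoA (fuel+1) (a :: bb :: t) K count =
            (if (sortI ((a + bb * 2) :: t)).headD 0 ≥ K then count + 1
             else solutionGoA fuel (sortI ((a + bb * 2) :: t)) K (count + 1)) := by
          simp [solutionGoA, sortI]
        have stepB : solutionGoB (fuel+1) base q K count =
            (if peekMin b2 (q2 ++ [v]) ≥ K then count + 1
             else solutionGoB fuel b2 (q2 ++ [v]) K (count + 1)) := by
          simp [solutionGoB, hpop1, hpop2, hone, hv]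
        rw [stepA, stepB, hhead]
        split
        · rfl
        · exact ih (b2) (q2 ++ [v]) (sortI ((a + bb * 2) :: t)) (count + 1)
            hb2 hq3 hinv' hs2perm (sortI_pairwise _)
            (by have h0 := hlen2; simp at h0 ⊢; omega)
            (by have h0 := hlen2; simp at h0 ⊢; omega)

-- ===== VERDICT (by name: the statement is the Claim_ definition above) =====
theorem solution_spec : Claim_equal_solution := by
  intro scoville K _ hpre
  unfold Spec_solution solution solution_alt
  have hlen : (PySem.List.sorted scoville (fun x => x) false).length = scoville.length :=
    PySem.List.length_sorted ..
  have hne : 1 ≤ (PySem.List.sorted scoville (fun x => x) false).length + ([] : List Int).length := by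
    simp only [List.length_nil, Nat.add_zero, hlen]
    rcases scoville with _ | ⟨h, t⟩
    · exact absurd rfl hpre
    · simp
  have h := go_eq K scoville.length (PySem.List.sorted scoville (fun x => x) false) []
    (PySem.List.sorted scoville (fun x => x) false) 0
    (sortI_pairwise scoville) List.Pairwise.nil
    (by intro w hw; simp at hw)
    (by simp) (sortI_pairwise scoville)
    hne (by simp [hlen])
  simp only [hlen]
  exact h
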